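-- pv_equiv track=rewrite | github.com/TATP-233/DISCOVERSE | discoverse/examples/universal_tasks/universal_task_runtime.py | merge_states_array
-- ===== SOURCE A (Python) =====
-- def merge_states_array(template_states: list, override_states: list) -> list:
--     """合并状态数组（按索引覆盖）
--
--     Args:
--         template_states: 模板中的状态数组
--         override_states: 覆盖配置中的状态数组
--
--     Returns:
--         合并后的状态数组
--     """
--     # 从模板开始
--     result = template_states.copy()
--
--     # 按索引覆盖
--     for i, override_state in enumerate(override_states):
--         if i < len(result):
--             # 覆盖已有的状态
--             result[i] = override_state
--         else:
--             # 添加新状态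
--             result.append(override_state)
--
--     return result
-- ===== SOURCE B (Python) =====
-- def merge_states_array(template_states: list, override_states: list) -> list:
--     """合并状态数组（按索引覆盖）— recursive head/tail merge."""
--     if not override_states:
--         return list(template_states)
--     return [override_states[0]] + merge_states_array(template_states[1:], override_states[1:])
-- ===== Notes on version B (the rewrite author's own statement) =====
-- stated objective: alternative
-- what changed: Replaces A's copy-then-enumerate loop with in-place overwrite/append by a structural recursion that consumes both lists head-first: each override heads the result and the recursion merges the tails, the remaining template supplying the base case.
import Mathlib
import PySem

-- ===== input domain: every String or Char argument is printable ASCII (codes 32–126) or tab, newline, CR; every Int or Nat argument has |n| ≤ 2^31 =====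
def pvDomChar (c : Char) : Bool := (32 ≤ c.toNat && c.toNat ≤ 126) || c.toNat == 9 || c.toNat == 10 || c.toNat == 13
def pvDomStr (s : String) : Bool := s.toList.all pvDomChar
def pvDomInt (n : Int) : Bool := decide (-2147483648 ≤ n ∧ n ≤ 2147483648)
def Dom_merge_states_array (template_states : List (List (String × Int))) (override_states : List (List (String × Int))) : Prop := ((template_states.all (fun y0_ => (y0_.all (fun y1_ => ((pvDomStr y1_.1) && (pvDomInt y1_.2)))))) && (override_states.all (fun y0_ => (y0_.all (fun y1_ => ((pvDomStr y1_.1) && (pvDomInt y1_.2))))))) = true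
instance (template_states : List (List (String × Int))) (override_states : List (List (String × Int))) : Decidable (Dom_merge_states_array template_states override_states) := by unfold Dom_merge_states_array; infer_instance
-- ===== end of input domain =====

-- ===== PORT A =====
-- A: copy the template, then for each (i, override_state) overwrite index i if in range, else append.
-- (i ≥ 0 always since enumerate starts at 0, so the Int→Nat index conversion is exact here.)
def merge_states_array (template_states : List (List (String × Int))) (override_states : List (List (String × Int))) : List (List (String × Int)) :=
  (PySem.List.enumerate override_states).foldl
    (fun result p =>
      if p.1 < (result.length : Int) then
        result.set p.1.toNat p.2
      else
        result ++ [p.2])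
    template_states

-- ===== PORT B =====
-- B (alternative): structural recursion consuming both lists head-first; when the
-- overrides run out, the remaining template is the answer.
def merge_states_array_alt (template_states : List (List (String × Int))) (override_states : List (List (String × Int))) : List (List (String × Int)) :=
  match override_states with
  | [] => template_states
  | v :: rest => v :: merge_states_array_alt (template_states.drop 1) rest

-- ===== PRECONDITION & SPEC =====
def Spec_merge_states_array (template_states : List (List (String × Int))) (override_states : List (List (String × Int))) (out : List (List (String × Int))) : Prop := out = merge_states_array_alt template_states override_states
instance (template_states : List (List (String × Int))) (override_states : List (List (String × Int))) (out : List (List (String × Int))) : Decidable (Spec_merge_states_array template_states override_states out) := by unfold Spec_merge_states_array; infer_instance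

-- ===== CLAIM (what is proved, stated in full; the proofs are below) =====
def Claim_equal_merge_states_array : Prop := ∀ (template_states : List (List (String × Int))) (override_states : List (List (String × Int))), Dom_merge_states_array template_states override_states → Spec_merge_states_array template_states override_states (merge_states_array template_states override_states)

-- ===== LEMMAS AND PROOFS =====
-- set at index pre.length in pre ++ x :: t replaces x
theorem pv_set_append_mid {α : Type} (pre t : List α) (x v : α) :
    (pre ++ x :: t).set pre.length v = pre ++ v :: t := by
  induction pre with
  | nil => rfl
  | cons a pre ih => simp [ih]

-- loop invariant: folding the overrides enumerated from pre.length over pre ++ t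
theorem pv_fold_key {α : Type} (o : List α) (pre t : List α) :
    (PySem.List.enumerate o (pre.length : Int)).foldl
      (fun result p =>
        if p.1 < (result.length : Int) then
          result.set p.1.toNat p.2
        else
          result ++ [p.2])
      (pre ++ t)
    = pre ++ o ++ t.drop o.length := by
  induction o generalizing pre t with
  | nil => simp
  | cons v o ih =>
    rw [PySem.List.enumerate_cons]
    cases t with
    | nil =>
      simp only [List.foldl_cons, List.append_nil]
      rw [if_neg (by simp)]
      have h := ih (pre ++ [v]) []
      simp at h
      simpa using h
    | cons x t =>
      simp only [List.foldl_cons]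
      rw [if_pos (by simp)]
      have hset : ((pre ++ x :: t).set (pre.length : Int).toNat v) = (pre ++ [v]) ++ t := by
        simp only [Int.toNat_natCast, pv_set_append_mid]
        simp
      rw [hset]
      have h := ih (pre ++ [v]) t
      simp only [List.length_append, List.length_cons, List.length_nil] at h ⊢
      rw [show ((pre.length : Int) + 1) = ((pre.length + 1 : Nat) : Int) by push_cast; ring] at ⊢
      simpa using h

-- B's recursion computes the overrides followed by the template's tail
theorem pv_alt_closed (t o : List (List (String × Int))) :
    merge_states_array_alt t o = o ++ t.drop o.length := by
  induction o generalizing t with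
  | nil => simp [merge_states_array_alt]
  | cons v o ih => simp [merge_states_array_alt, ih, List.drop_drop]

-- ===== VERDICT (by name: the statement is the Claim_ definition above) =====
theorem merge_states_array_spec : Claim_equal_merge_states_array := by
  intro t o _
  unfold Spec_merge_states_array merge_states_array
  rw [pv_alt_closed]
  have h := pv_fold_key o [] t
  simpa [PySem.List.enumerate] using h
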